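-- pv_equiv track=rewrite | github.com/stephenfinch/Code-Wars | Sept-2020/war_9-17-20.py | num_of_open_lockers
-- ===== SOURCE A (Python) =====
-- def num_of_open_lockers(n):
-- 	doors = []
-- 	for a in range(1,n + 1):
-- 		factors=[]
-- 		for i in range(1, a + 1):
-- 			if a % i == 0:
-- 				factors.append(i)
-- 		doors.append(len(factors) % 2 == 0)
-- 	return doors.count(True)
-- ===== SOURCE B (Python) =====
-- def num_of_open_lockers(n):
--     # Lockers with an even number of divisors are exactly the non-squares:
--     # answer = n - floor(sqrt(n)).  Compute floor(sqrt(n)) by a simple scan.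
--     if n <= 0:
--         return 0
--     r = 0
--     while (r + 1) * (r + 1) <= n:
--         r += 1
--     return n - r
-- ===== Notes on version B (the rewrite author's own statement) =====
-- stated objective: faster
-- what changed: Replaces the doubly nested divisor-counting loops with the identity 'lockers with an even divisor count = non-squares', returning n - floor(sqrt(n)) computed by a single O(sqrt(n)) scan.
import Mathlib
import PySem

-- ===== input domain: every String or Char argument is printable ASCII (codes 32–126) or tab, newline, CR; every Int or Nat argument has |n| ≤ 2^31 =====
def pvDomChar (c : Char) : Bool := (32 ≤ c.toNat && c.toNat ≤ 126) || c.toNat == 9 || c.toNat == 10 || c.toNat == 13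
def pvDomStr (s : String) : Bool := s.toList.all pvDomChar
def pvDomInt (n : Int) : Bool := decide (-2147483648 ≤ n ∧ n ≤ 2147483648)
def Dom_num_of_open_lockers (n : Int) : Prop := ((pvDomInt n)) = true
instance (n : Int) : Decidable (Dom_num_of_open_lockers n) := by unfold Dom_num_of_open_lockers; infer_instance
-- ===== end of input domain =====

-- B replaces the O(n^2) nested divisor-counting loops by the closed form
-- n - floor(sqrt(n)) (non-squares have an even divisor count), computing
-- floor(sqrt(n)) with a single O(sqrt(n)) scan; objective: faster.


-- ===== PORT A =====
def num_of_open_lockers (n : Int) : Int :=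
  let doors := (PySem.List.pyRange 1 (n + 1) 1).foldl (fun doors a =>
    let factors := (PySem.List.pyRange 1 (a + 1) 1).foldl (fun factors i =>
      if PySem.Int.mod a i = 0 then factors ++ [i] else factors) ([] : List Int)
    doors ++ [decide (PySem.Int.mod (factors.length : Int) 2 = 0)]) ([] : List Bool)
  (doors.count true : Int)

-- ===== PORT B =====
-- the 'while (r+1)*(r+1) <= n: r += 1' loop of Source B
def isqrtScan (n : Int) (r : Nat) : Nat :=
  if h : ((r : Int) + 1) * ((r : Int) + 1) ≤ n then isqrtScan n (r + 1) else r
termination_by n.toNat - r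
decreasing_by
  have h1 : (r : Int) + 1 ≤ ((r : Int) + 1) * ((r : Int) + 1) := by nlinarith
  omega

def num_of_open_lockers_alt (n : Int) : Int :=
  if n ≤ 0 then 0 else n - (isqrtScan n 0 : Int)

-- ===== PRECONDITION & SPEC =====
def Spec_num_of_open_lockers (n : Int) (out : Int) : Prop := out = num_of_open_lockers_alt n
instance (n : Int) (out : Int) : Decidable (Spec_num_of_open_lockers n out) := by unfold Spec_num_of_open_lockers; infer_instance

-- ===== CLAIM (what is proved, stated in full; the proofs are below) =====
def Claim_equal_num_of_open_lockers : Prop := ∀ (n : Int), Dom_num_of_open_lockers n → Spec_num_of_open_lockers n (num_of_open_lockers n)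

-- ===== LEMMAS AND PROOFS =====

-- A's inner loop counts the divisors of a (for a ≥ 1).
theorem inner_loop_divisors (a : Int) (ha : 1 ≤ a) :
    (((PySem.List.pyRange 1 (a + 1) 1).foldl (fun factors i =>
      if PySem.Int.mod a i = 0 then factors ++ [i] else factors) ([] : List Int)).length : Int)
    = (a.toNat.divisors.card : Int) := by
  rw [PySem.List.foldl_append_ite_eq_filter]
  rw [List.nil_append]
  congr 1
  have hnd : (PySem.List.pyRange 1 (a + 1) 1).Nodup := PySem.List.nodup_pyRange_one 1 (a + 1)
  have hndf : ((PySem.List.pyRange 1 (a + 1) 1).filter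
      (fun i => decide (PySem.Int.mod a i = 0))).Nodup := hnd.filter _
  rw [← List.toFinset_card_of_nodup hndf]
  apply Finset.card_bij (fun (i : Int) _ => i.toNat)
  · intro i hi
    simp only [List.mem_toFinset, List.mem_filter, decide_eq_true_eq] at hi
    obtain ⟨hmem, hmod⟩ := hi
    rw [PySem.List.mem_pyRange_one] at hmem
    have hipos : 1 ≤ i := hmem.1
    have hile : i < a + 1 := hmem.2
    rw [Nat.mem_divisors]
    have hmod' : PySem.Int.mod a i = a % i :=
      PySem.Int.mod_eq_emod_of_pos (by omega)
    have hdvd : i ∣ a := Int.dvd_of_emod_eq_zero (by rw [← hmod']; exact hmod)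
    constructor
    · have : (i.toNat : Int) ∣ (a.toNat : Int) := by
        rwa [Int.toNat_of_nonneg (by omega), Int.toNat_of_nonneg (by omega)]
      exact_mod_cast this
    · omega
  · intro i hi j hj hij
    simp only [List.mem_toFinset, List.mem_filter, decide_eq_true_eq] at hi hj
    rw [PySem.List.mem_pyRange_one] at hi hj
    omega
  · intro d hd
    rw [Nat.mem_divisors] at hd
    obtain ⟨hdvd, hne⟩ := hd
    have hdpos : 1 ≤ d := Nat.pos_of_dvd_of_pos hdvd (by omega)
    have hdle : d ≤ a.toNat := Nat.le_of_dvd (by omega) hdvd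
    refine ⟨(d : Int), ?_, by simp⟩
    simp only [List.mem_toFinset, List.mem_filter, decide_eq_true_eq]
    constructor
    · rw [PySem.List.mem_pyRange_one]; omega
    · have hmod' : PySem.Int.mod a (d : Int) = Int.emod a (d : Int) :=
        PySem.Int.mod_eq_emod_of_pos (show (0:Int) < (d:Int) by omega)
      rw [hmod']
      apply Int.emod_eq_zero_of_dvd
      have : ((d : Nat) : Int) ∣ ((a.toNat : Nat) : Int) := Int.natCast_dvd_natCast.mpr hdvd
      rwa [Int.toNat_of_nonneg (by omega)] at this

-- Pairing d ↦ m/d: divisors below and above the square root are in bijection.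
theorem card_small_eq_card_large (m : Nat) (hm : 1 ≤ m) :
    (m.divisors.filter (fun i => i * i < m)).card
      = (m.divisors.filter (fun i => m < i * i)).card := by
  apply Finset.card_bij' (fun (i : Nat) _ => m / i) (fun (j : Nat) _ => m / j)
  · intro i hi
    simp only [Finset.mem_filter, Nat.mem_divisors] at hi ⊢
    obtain ⟨⟨hdvd, hne⟩, hlt⟩ := hi
    have hipos : 0 < i := Nat.pos_of_dvd_of_pos hdvd (by omega)
    obtain ⟨q, hq⟩ := hdvd
    have hqdiv : m / i = q := by rw [hq]; exact Nat.mul_div_cancel_left q hipos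
    have hiq : i < q := by
      by_contra hc
      push_neg at hc
      have : m ≤ i * i := by calc m = i * q := hq
                                  _ ≤ i * i := Nat.mul_le_mul_left i hc
      omega
    rw [hqdiv]
    refine ⟨⟨⟨i, by rw [hq, Nat.mul_comm]⟩, hne⟩, ?_⟩
    calc m = i * q := hq
      _ < q * q := Nat.mul_lt_mul_of_lt_of_le hiq (le_refl q) (by omega)
  · intro j hj
    simp only [Finset.mem_filter, Nat.mem_divisors] at hj ⊢
    obtain ⟨⟨hdvd, hne⟩, hgt⟩ := hj
    have hjpos : 0 < j := Nat.pos_of_dvd_of_pos hdvd (by omega)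
    obtain ⟨q, hq⟩ := hdvd
    have hqdiv : m / j = q := by rw [hq]; exact Nat.mul_div_cancel_left q hjpos
    have hqj : q < j := by
      by_contra hc
      push_neg at hc
      have : j * j ≤ m := by calc j * j ≤ j * q := Nat.mul_le_mul_left j hc
                                  _ = m := hq.symm
      omega
    have hqpos : 0 < q := by
      rcases Nat.eq_zero_or_pos q with h0 | h
      · subst h0; simp at hq; omega
      · exact h
    rw [hqdiv]
    refine ⟨⟨⟨j, by rw [hq, Nat.mul_comm]⟩, hne⟩, ?_⟩
    calc q * q < j * q := Nat.mul_lt_mul_of_lt_of_le hqj (le_refl q) hqpos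
      _ = m := by rw [hq, Nat.mul_comm]
  · intro i hi
    simp only [Finset.mem_filter, Nat.mem_divisors] at hi
    exact Nat.div_div_self hi.1.1 hi.1.2
  · intro j hj
    simp only [Finset.mem_filter, Nat.mem_divisors] at hj
    exact Nat.div_div_self hj.1.1 hj.1.2

-- The square-root divisor exists iff m is a perfect square.
theorem card_eq_divisors (m : Nat) (hm : 1 ≤ m) :
    m.divisors.card
      = 2 * (m.divisors.filter (fun i => i * i < m)).card
        + (if Nat.sqrt m * Nat.sqrt m = m then 1 else 0) := by
  have h1 : (m.divisors.filter (fun i => i * i < m)).card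
      + (m.divisors.filter (fun i => ¬ i * i < m)).card = m.divisors.card :=
    Finset.filter_card_add_filter_neg_card_eq_card _
  have h2 : ((m.divisors.filter (fun i => ¬ i * i < m)).filter (fun i => i * i = m)).card
      + ((m.divisors.filter (fun i => ¬ i * i < m)).filter (fun i => ¬ i * i = m)).card
      = (m.divisors.filter (fun i => ¬ i * i < m)).card :=
    Finset.filter_card_add_filter_neg_card_eq_card _
  have hE : (m.divisors.filter (fun i => ¬ i * i < m)).filter (fun i => i * i = m)
      = m.divisors.filter (fun i => i * i = m) := by
    rw [Finset.filter_filter]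
    apply Finset.filter_congr
    intro i _
    constructor
    · intro h; exact h.2
    · intro h; exact ⟨by omega, h⟩
  have hG : (m.divisors.filter (fun i => ¬ i * i < m)).filter (fun i => ¬ i * i = m)
      = m.divisors.filter (fun i => m < i * i) := by
    rw [Finset.filter_filter]
    apply Finset.filter_congr
    intro i _
    constructor
    · intro h; omega
    · intro h; omega
  have hEcard : (m.divisors.filter (fun i => i * i = m)).card
      = (if Nat.sqrt m * Nat.sqrt m = m then 1 else 0) := by
    split_ifs with hs
    · rw [Finset.card_eq_one]
      refine ⟨Nat.sqrt m, ?_⟩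
      ext i
      simp only [Finset.mem_filter, Nat.mem_divisors, Finset.mem_singleton]
      constructor
      · intro ⟨_, hii⟩
        have : i * i = Nat.sqrt m * Nat.sqrt m := by omega
        exact Nat.mul_self_inj.mp this
      · intro h
        subst h
        exact ⟨⟨⟨Nat.sqrt m, hs.symm⟩, by omega⟩, hs⟩
    · rw [Finset.card_eq_zero]
      apply Finset.filter_eq_empty_iff.mpr
      intro i _
      intro hii
      have hsq : Nat.sqrt (i * i) = i := by simpa [pow_two] using Nat.sqrt_eq' i
      rw [hii] at hsq
      rw [hsq] at hs
      exact hs hii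
  rw [hE, hG] at h2
  rw [hEcard] at h2
  rw [← card_small_eq_card_large m hm] at h2
  omega

-- Parity: a locker a ≥ 1 has an even number of divisors iff it is not a square.
theorem even_divisors_iff (m : Nat) (hm : 1 ≤ m) :
    (m.divisors.card % 2 = 0) ↔ ¬ (Nat.sqrt m * Nat.sqrt m = m) := by
  have h := card_eq_divisors m hm
  split_ifs at h with hs
  · rw [h]; simp only [hs, not_true_eq_false, iff_false]; omega
  · rw [h]; simp only [hs, not_false_eq_true, iff_true]; omega

-- Step behaviour of Nat.sqrt at m+1.
theorem sqrt_succ_step (m : Nat) :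
    Nat.sqrt (m + 1)
      = Nat.sqrt m + (if Nat.sqrt (m + 1) * Nat.sqrt (m + 1) = m + 1 then 1 else 0) := by
  have hmono : Nat.sqrt m ≤ Nat.sqrt (m + 1) := Nat.sqrt_le_sqrt (by omega)
  split_ifs with hs
  · -- m+1 is a square with root s = sqrt (m+1) ≥ 1
    set s := Nat.sqrt (m + 1) with hsdef
    have hspos : 1 ≤ s := by
      by_contra hc
      push_neg at hc
      interval_cases s
      omega
    have hlow : (s - 1) * (s - 1) ≤ m := by
      have : (s - 1) * (s - 1) < s * s :=
        Nat.mul_lt_mul_of_lt_of_le (by omega) (by omega) (by omega)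
      omega
    have h1 : s - 1 ≤ Nat.sqrt m := Nat.le_sqrt.mpr hlow
    have h2 : Nat.sqrt m < s := by
      have hm1 : Nat.sqrt m * Nat.sqrt m ≤ m := Nat.sqrt_le m
      by_contra hc
      push_neg at hc
      have hss : s * s ≤ Nat.sqrt m * Nat.sqrt m := Nat.mul_le_mul hc hc
      omega
    omega
  · -- m+1 not a square: sqrt stays
    have hle : Nat.sqrt (m + 1) ≤ Nat.sqrt m := by
      by_contra hc
      push_neg at hc
      have h1 : Nat.sqrt (m + 1) * Nat.sqrt (m + 1) ≤ m + 1 := Nat.sqrt_le (m + 1)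
      have h2 : Nat.sqrt (m + 1) * Nat.sqrt (m + 1) ≤ m := by omega
      have : Nat.sqrt (m + 1) ≤ Nat.sqrt m := Nat.le_sqrt.mpr h2
      omega
    omega

-- Counting non-squares in 1..N gives N - sqrt N.
theorem count_nonsquares (N : Nat) :
    (List.range N).countP (fun k => decide (¬ (Nat.sqrt (k + 1) * Nat.sqrt (k + 1) = k + 1)))
      = N - Nat.sqrt N := by
  induction N with
  | zero => simp
  | succ N ih =>
    rw [List.range_succ, List.countP_append, ih]
    have hstep := sqrt_succ_step N
    have hle : Nat.sqrt N ≤ N := Nat.sqrt_le_self N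
    have hle1 : Nat.sqrt (N + 1) ≤ N + 1 := Nat.sqrt_le_self (N + 1)
    simp only [List.countP_cons, List.countP_nil]
    split_ifs at hstep with hs
    · simp [hs]
      omega
    · simp [hs]
      omega

-- B's scan computes Nat.sqrt of n (for 0 ≤ n), starting from any valid lower bound r.
theorem isqrtScan_eq_sqrt (n : Int) (hn : 0 ≤ n) (r : Nat) (hr : (r : Int) * r ≤ n) :
    isqrtScan n r = Nat.sqrt n.toNat := by
  induction r using isqrtScan.induct n with
  | case1 r h ih =>
    rw [isqrtScan, dif_pos h]
    exact ih (by push_cast; exact_mod_cast h)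
  | case2 r h =>
    rw [isqrtScan, dif_neg h]
    push_neg at h
    have h1 : r * r ≤ n.toNat := by
      have : (r : Int) * r ≤ (n.toNat : Int) := by rwa [Int.toNat_of_nonneg hn]
      exact_mod_cast this
    have h2 : n.toNat < (r + 1) * (r + 1) := by
      have : (n.toNat : Int) < ((r : Int) + 1) * ((r : Int) + 1) := by
        rwa [Int.toNat_of_nonneg hn]
      exact_mod_cast this
    have hub : Nat.sqrt n.toNat < r + 1 := by
      by_contra hc
      push_neg at hc
      have := Nat.sqrt_le n.toNat
      have : (r + 1) * (r + 1) ≤ Nat.sqrt n.toNat * Nat.sqrt n.toNat :=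
        Nat.mul_le_mul hc hc
      omega
    have hlb : r ≤ Nat.sqrt n.toNat := Nat.le_sqrt.mpr h1
    omega

-- A as a count of non-squares among 1..n.
theorem A_eq_count (n : Int) :
    num_of_open_lockers n
      = ((List.range n.toNat).countP
          (fun k => decide (¬ (Nat.sqrt (k + 1) * Nat.sqrt (k + 1) = k + 1))) : Int) := by
  simp only [num_of_open_lockers, PySem.List.foldl_append_singleton_eq_map, List.nil_append]
  rw [List.count_eq_countP, List.countP_map]
  congr 1
  rw [PySem.List.pyRange_one 1 (n + 1)]
  have : n + 1 - 1 = n := by omega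
  rw [this, List.countP_map]
  apply List.countP_congr
  intro k hk
  rw [List.mem_range] at hk
  have ha : (1 : Int) ≤ 1 + (k : Int) := by omega
  have hinner := inner_loop_divisors (1 + (k : Int)) ha
  have htn : (1 + (k : Int)).toNat = k + 1 := by omega
  rw [htn] at hinner
  have hlen : ((((PySem.List.pyRange 1 (1 + (k : Int) + 1) 1).foldl (fun factors i =>
      if PySem.Int.mod (1 + (k : Int)) i = 0 then factors ++ [i] else factors)
      ([] : List Int)).length : Int)) = ((k + 1).divisors.card : Int) := hinner
  simp only [Function.comp]
  have hmodeq : PySem.Int.mod (((PySem.List.pyRange 1 (1 + (k : Int) + 1) 1).foldl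
      (fun factors i => if PySem.Int.mod (1 + (k : Int)) i = 0 then factors ++ [i] else factors)
      ([] : List Int)).length : Int) 2
      = PySem.Int.mod (((k + 1).divisors.card : Nat) : Int) 2 := by rw [hlen]
  rw [hmodeq]
  have hcast : PySem.Int.mod (((k + 1).divisors.card : Nat) : Int) 2
      = (((k + 1).divisors.card % 2 : Nat) : Int) := by
    rw [show (2 : Int) = ((2 : Nat) : Int) from rfl, PySem.Int.mod_natCast]
  rw [hcast]
  have hpar := even_divisors_iff (k + 1) (by omega)
  simp only [beq_iff_eq, decide_eq_true_eq]
  constructor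
  · intro h; exact hpar.mp (by exact_mod_cast h)
  · intro h; exact_mod_cast hpar.mpr h

-- ===== VERDICT (by name: the statement is the Claim_ definition above) =====
theorem num_of_open_lockers_spec : Claim_equal_num_of_open_lockers := by
  intro n _
  show num_of_open_lockers n = num_of_open_lockers_alt n
  rw [A_eq_count n, count_nonsquares]
  unfold num_of_open_lockers_alt
  split_ifs with hneg
  · have : n.toNat = 0 := by omega
    simp [this]
  · push_neg at hneg
    have h1 : Nat.sqrt n.toNat ≤ n.toNat := Nat.sqrt_le_self _
    rw [isqrtScan_eq_sqrt n (le_of_lt hneg) 0 (by push_cast; omega)]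
    omega
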